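-- pv_equiv track=rewrite | github.com/trentleslie/arangoimport | scripts/diagnose_missing_nodes.py | check_key_collisions
-- ===== SOURCE A (Python) =====
-- from typing import Dict, List, Set, Any, Tuple
--
-- def check_key_collisions(
--     missing_ids: List[str],
--     node_data: Dict[str, Dict[str, Any]]
-- ) -> Dict[str, List[str]]:
--     """Check for potential key collisions among missing nodes.
--
--     Args:
--         missing_ids: List of missing node IDs
--         node_data: Dictionary mapping node IDs to their data
--
--     Returns:
--         Dictionary mapping ArangoDB keys to lists of Neo4j IDs that would share that key
--     """
--     key_to_ids = {}
--
--     for node_id in missing_ids: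
--         # This mimics the key generation in the importer
--         key = str(node_id).replace(':', '_').replace('/', '_')
--
--         if key not in key_to_ids:
--             key_to_ids[key] = []
--         key_to_ids[key].append(node_id)
--
--     # Filter to only keys with multiple IDs (collisions)
--     return {k: v for k, v in key_to_ids.items() if len(v) > 1}
-- ===== SOURCE B (Python) =====
-- def check_key_collisions(missing_ids, node_data):
--     """Two-pass: count keys first, then collect only ids whose key collides."""
--     counts = {}
--     for node_id in missing_ids:
--         key = str(node_id).replace(':', '_').replace('/', '_')
--         counts[key] = counts.get(key, 0) + 1
--     result = {}
--     for node_id in missing_ids: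
--         key = str(node_id).replace(':', '_').replace('/', '_')
--         if counts[key] > 1:
--             result.setdefault(key, []).append(node_id)
--     return result
-- ===== Notes on version B (the rewrite author's own statement) =====
-- stated objective: alternative
-- what changed: A builds every group in one pass and filters the finished dict for lists longer than 1; B makes two passes: it first counts keys in a plain counts dict, then collects into the result only ids whose key count exceeds 1, returning the result dict with no final filtering step.
import Mathlib
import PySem

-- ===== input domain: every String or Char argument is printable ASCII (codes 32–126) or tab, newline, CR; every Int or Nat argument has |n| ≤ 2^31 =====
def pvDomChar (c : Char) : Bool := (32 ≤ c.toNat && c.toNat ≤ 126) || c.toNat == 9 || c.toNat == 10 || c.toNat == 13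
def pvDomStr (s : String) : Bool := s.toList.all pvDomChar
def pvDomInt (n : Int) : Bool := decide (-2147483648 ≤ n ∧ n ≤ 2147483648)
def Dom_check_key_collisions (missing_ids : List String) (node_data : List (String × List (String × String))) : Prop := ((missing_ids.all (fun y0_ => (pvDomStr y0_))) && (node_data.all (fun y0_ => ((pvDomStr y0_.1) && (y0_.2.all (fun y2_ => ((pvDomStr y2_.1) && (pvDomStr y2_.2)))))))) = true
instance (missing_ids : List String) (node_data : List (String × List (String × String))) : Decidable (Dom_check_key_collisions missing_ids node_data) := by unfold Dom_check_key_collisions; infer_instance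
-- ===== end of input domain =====

-- B replaces A's build-all-groups-then-filter with a count-first two-pass collect of colliding ids only (objective: alternative decomposition, same cost).

-- shared helper: the key expression both Python sources compute inline
def pvKey (s : String) : String :=
  PySem.Str.replace (PySem.Str.replace s ":" "_") "/" "_"

-- ===== PORT A =====
def check_key_collisions (missing_ids : List String) (node_data : List (String × List (String × String))) : List (String × List String) :=
  let key_to_ids : PySem.Dict String (List String) :=
    missing_ids.foldl (fun d node_id =>
      let key := pvKey node_id
      let d' := if d.contains key then d else d.insert key []
      -- key_to_ids[key].append(node_id): key is present here, so in-place append is exactly modify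
      d'.modify key [] (fun v => v ++ [node_id])) PySem.Dict.empty
  key_to_ids.items.filter (fun p => decide (1 < p.2.length))

-- ===== PORT B =====
def check_key_collisions_alt (missing_ids : List String) (node_data : List (String × List (String × String))) : List (String × List String) :=
  let counts : PySem.Dict String Int :=
    missing_ids.foldl (fun d node_id =>
      let key := pvKey node_id
      d.insert key (d.getD key 0 + 1)) PySem.Dict.empty
  let result : PySem.Dict String (List String) :=
    missing_ids.foldl (fun d node_id =>
      let key := pvKey node_id
      -- counts[key]: key is always present in counts, so getD is exact
      if 1 < counts.getD key 0 then
        -- result.setdefault(key, []).append(node_id): in-place append with default [] is exactly modify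
        d.modify key [] (fun v => v ++ [node_id])
      else d) PySem.Dict.empty
  result.items

-- ===== PRECONDITION & SPEC =====
def Spec_check_key_collisions (missing_ids : List String) (node_data : List (String × List (String × String))) (out : List (String × List String)) : Prop := out = check_key_collisions_alt missing_ids node_data
instance (missing_ids : List String) (node_data : List (String × List (String × String))) (out : List (String × List String)) : Decidable (Spec_check_key_collisions missing_ids node_data out) := by unfold Spec_check_key_collisions; infer_instance

-- ===== CLAIM (what is proved, stated in full; the proofs are below) =====
def Claim_equal_check_key_collisions : Prop := ∀ (missing_ids : List String) (node_data : List (String × List (String × String))), Dom_check_key_collisions missing_ids node_data → Spec_check_key_collisions missing_ids node_data (check_key_collisions missing_ids node_data)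

-- ===== LEMMAS AND PROOFS =====

-- the grouping fold both sides reduce to, and the common closed form of both outputs
def pvGrpFold (l : List String) : PySem.Dict String (List String) :=
  l.foldl (fun d nid => d.modify (pvKey nid) [] (fun v => v ++ [nid])) PySem.Dict.empty

def pvOut (ids : List String) : List (String × List String) :=
  ((PySem.Set.ofList (ids.map pvKey)).filter (fun k => decide (1 < (ids.map pvKey).count k))).map
    (fun k => (k, ids.filter (fun nid => pvKey nid == k)))

lemma pvBodyA_eq (d : PySem.Dict String (List String)) (k : String) (f : List String → List String) :
    (if d.contains k then d else d.insert k []).modify k [] f = d.modify k [] f := by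
  by_cases h : d.contains k = true
  · simp [h]
  · simp only [Bool.not_eq_true] at h
    simp [h, PySem.Dict.modify, PySem.Dict.getD_insert_self, PySem.Dict.insert_insert_self,
      PySem.Dict.getD_of_not_contains _ _ h]

lemma pvGetD_grp (l : List String) (c : String) :
    (pvGrpFold l).getD c [] = l.filter (fun nid => pvKey nid == c) := by
  have h1 : pvGrpFold l
      = (l.map (fun nid => (pvKey nid, nid))).foldl
          (fun d p => d.modify p.1 [] (fun v => v ++ [p.2])) PySem.Dict.empty := by
    simp [pvGrpFold, List.foldl_map]
  rw [h1, PySem.Dict.getD_foldl_modify_append]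
  simp [List.filter_map, Function.comp_def]

lemma pvKeys_grp (l : List String) :
    (pvGrpFold l).keys = PySem.Set.ofList (l.map pvKey) := by
  simpa [pvGrpFold, PySem.Set.update, PySem.Set.ofList_eq_foldl]
    using PySem.Dict.keys_foldl_modify_key l pvKey [] (fun _ nid v => v ++ [nid]) PySem.Dict.empty

lemma pvNodup_keys_grp (l : List String) : (pvGrpFold l).keys.Nodup := by
  apply PySem.Dict.nodup_keys_foldl_modify_key
  simp

lemma pvSet_foldl_add_filter {α : Type} [BEq α] [LawfulBEq α] (q : α → Bool) :
    ∀ (xs s : List α),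
      (xs.foldl PySem.Set.add s).filter q = (xs.filter q).foldl PySem.Set.add (s.filter q)
  | [], s => rfl
  | x :: xs, s => by
    have hadd : (PySem.Set.add s x).filter q
        = if q x then PySem.Set.add (s.filter q) x else s.filter q := by
      simp only [PySem.Set.add]
      by_cases hx : x ∈ s
      · by_cases hq : q x
        · simp [hx, hq, List.mem_filter]
        · simp [hx, hq]
      · by_cases hq : q x
        · simp [hx, hq, List.filter_append, List.mem_filter]
        · simp [hx, hq, List.filter_append]
    by_cases hq : q x
    · rw [List.foldl_cons, pvSet_foldl_add_filter q xs _, hadd, if_pos hq,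
        List.filter_cons_of_pos hq, List.foldl_cons]
    · rw [List.foldl_cons, pvSet_foldl_add_filter q xs _, hadd, if_neg hq,
        List.filter_cons_of_neg hq]

lemma pvSet_ofList_filter {α : Type} [BEq α] [LawfulBEq α] (q : α → Bool) (xs : List α) :
    PySem.Set.ofList (xs.filter q) = (PySem.Set.ofList xs).filter q := by
  simpa [PySem.Set.ofList_eq_foldl] using (pvSet_foldl_add_filter q xs []).symm

lemma pvCounts_getD (l : List String) (c : String) :
    (l.foldl (fun d nid => d.insert (pvKey nid) (d.getD (pvKey nid) 0 + 1))
        (PySem.Dict.empty : PySem.Dict String Int)).getD c 0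
      = ((l.map pvKey).count c : Int) := by
  simpa [List.foldl_map] using PySem.Dict.getD_foldl_insert_add_one (l.map pvKey) PySem.Dict.empty c

lemma pvCount_eq_length_grp (l : List String) (k : String) :
    (l.map pvKey).count k = (l.filter (fun nid => pvKey nid == k)).length := by
  simp [List.count, List.countP_eq_length_filter, List.filter_map, Function.comp_def]

lemma pvItems_grp (l : List String) :
    (pvGrpFold l).items
      = (PySem.Set.ofList (l.map pvKey)).map
          (fun k => (k, (pvGrpFold l).getD k [])) := by
  rw [← pvKeys_grp]
  exact PySem.Dict.items_eq_map_keys _ (pvNodup_keys_grp l) []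

lemma pvA_char (ids : List String) (nd : List (String × List (String × String))) :
    check_key_collisions ids nd = pvOut ids := by
  unfold check_key_collisions
  show (ids.foldl (fun d node_id =>
      let key := pvKey node_id
      let d' := if d.contains key then d else d.insert key []
      d'.modify key [] (fun v => v ++ [node_id])) PySem.Dict.empty).items.filter
        (fun p => decide (1 < p.2.length)) = pvOut ids
  have hA1 : ids.foldl (fun d node_id =>
      let key := pvKey node_id
      let d' := if d.contains key then d else d.insert key []
      d'.modify key [] (fun v => v ++ [node_id])) PySem.Dict.empty = pvGrpFold ids := by
    simp only [pvGrpFold, pvBodyA_eq]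
  rw [hA1, pvItems_grp]
  simp only [pvGetD_grp]
  rw [List.filter_map, pvOut]
  congr 1
  apply List.filter_congr
  intro k _
  simp [pvCount_eq_length_grp]

set_option maxHeartbeats 1000000 in
lemma pvB_char (ids : List String) (nd : List (String × List (String × String))) :
    check_key_collisions_alt ids nd = pvOut ids := by
  unfold check_key_collisions_alt
  show ((ids.foldl (fun d node_id =>
      if 1 < (ids.foldl (fun d nid =>
          d.insert (pvKey nid) (d.getD (pvKey nid) 0 + 1))
          (PySem.Dict.empty : PySem.Dict String Int)).getD (pvKey node_id) 0 then
        d.modify (pvKey node_id) [] (fun v => v ++ [node_id])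
      else d) PySem.Dict.empty).items) = pvOut ids
  have hc : ∀ c, (ids.foldl (fun d nid =>
      d.insert (pvKey nid) (d.getD (pvKey nid) 0 + 1)) PySem.Dict.empty).getD c 0
        = ((ids.map pvKey).count c : Int) := pvCounts_getD ids
  have hB1 : ids.foldl (fun d node_id =>
      if 1 < (ids.foldl (fun d nid =>
          d.insert (pvKey nid) (d.getD (pvKey nid) 0 + 1))
          (PySem.Dict.empty : PySem.Dict String Int)).getD (pvKey node_id) 0 then
        d.modify (pvKey node_id) [] (fun v => v ++ [node_id])
      else d) PySem.Dict.empty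
      = pvGrpFold (ids.filter (fun nid => decide (1 < (ids.map pvKey).count (pvKey nid)))) := by
    rw [pvGrpFold, List.foldl_filter]
    apply List.foldl_ext
    intro d nid _
    rw [hc (pvKey nid)]
    by_cases h : 1 < (ids.map pvKey).count (pvKey nid)
    · rw [if_pos (by exact_mod_cast h), if_pos (by simpa using h)]
    · rw [if_neg (by exact_mod_cast h), if_neg (by simpa using h)]
  rw [hB1, pvItems_grp, pvOut]
  have hkeys : (ids.filter (fun nid => decide (1 < (ids.map pvKey).count (pvKey nid)))).map pvKey
      = (ids.map pvKey).filter (fun k => decide (1 < (ids.map pvKey).count k)) := by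
    rw [List.filter_map]
    simp [Function.comp_def]
  rw [hkeys, pvSet_ofList_filter]
  apply List.map_congr_left
  intro k hk
  have hQk : decide (1 < (ids.map pvKey).count k) = true := (List.mem_filter.mp hk).2
  rw [pvGetD_grp, List.filter_filter]
  refine congrArg (Prod.mk k) ?_
  apply List.filter_congr
  intro nid _
  by_cases hkey : pvKey nid == k
  · have heq : pvKey nid = k := by simpa using hkey
    simp [heq, hQk]
  · simp [hkey]

-- ===== VERDICT (by name: the statement is the Claim_ definition above) =====
theorem check_key_collisions_spec : Claim_equal_check_key_collisions := by
  intro ids nd _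
  unfold Spec_check_key_collisions
  rw [pvA_char, pvB_char]
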